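-- pv_equiv track=rewrite | github.com/YanisKachinskis/algorithms_python | lesson07/task_3.py | mediana
-- ===== SOURCE A (Python) =====
-- def mediana(arr):
--     for i in range(len(arr)):
--         n = m = k = 0
--         for j in range(len(arr)):
--             if arr[j] != arr[i]:
--                 if arr[j] > arr[i]:
--                     n += 1  # n - счетчик больших значений
--                 else:
--                     m += 1  # m - счетчик меньших значений
--         if n == m:
--             return arr[i]
-- ===== SOURCE B (Python) =====
-- def mediana(arr):
--     # Only the middle value of the sorted array can have equally many
--     # strictly-greater and strictly-smaller elements; verify it in one pass.
--     if not arr: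
--         return None
--     s = sorted(arr)
--     c = s[len(arr) // 2]
--     less = greater = 0
--     for x in arr:
--         if x < c:
--             less += 1
--         elif x > c:
--             greater += 1
--     return c if less == greater else None
-- ===== Notes on version B (the rewrite author's own statement) =====
-- stated objective: faster
-- what changed: Instead of recounting greater/smaller elements for every element (O(n^2)), B sorts once, observes that only the middle value sorted(arr)[n//2] can have equal greater/smaller counts, and verifies that single candidate in one linear pass.
import Mathlib
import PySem

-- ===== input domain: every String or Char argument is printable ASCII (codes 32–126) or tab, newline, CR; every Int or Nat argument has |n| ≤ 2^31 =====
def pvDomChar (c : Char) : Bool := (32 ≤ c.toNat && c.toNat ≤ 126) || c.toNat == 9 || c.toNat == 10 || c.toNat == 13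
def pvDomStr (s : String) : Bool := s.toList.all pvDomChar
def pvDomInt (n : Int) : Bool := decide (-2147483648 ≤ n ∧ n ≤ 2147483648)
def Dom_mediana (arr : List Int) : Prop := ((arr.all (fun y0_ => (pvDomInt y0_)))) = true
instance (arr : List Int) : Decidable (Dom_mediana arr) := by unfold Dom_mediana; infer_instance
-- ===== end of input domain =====

-- B changes the algorithm: A recounts greater/smaller for every element (quadratic);
-- B sorts once, takes the single possible candidate sorted(arr)[n//2] and verifies it in one pass.

-- ===== PORT A =====
-- inner loop 'for j in range(len(arr))' accumulating (n, m); the unused counter k is omitted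
def medianaInner (arr : List Int) (vi : Int) : Int × Int :=
  (PySem.List.pyRange 0 arr.length 1).foldl
    (fun (s : Int × Int) j =>
      if PySem.List.pyGetD arr j 0 ≠ vi then
        (if PySem.List.pyGetD arr j 0 > vi then (s.1 + 1, s.2) else (s.1, s.2 + 1))
      else s)
    (0, 0)

-- outer loop 'for i in range(len(arr))' with early return
def medianaLoop (arr : List Int) : List Int → Option Int
  | [] => none
  | i :: is =>
    let vi := PySem.List.pyGetD arr i 0
    let nm := medianaInner arr vi
    if nm.1 = nm.2 then some vi else medianaLoop arr is

def mediana (arr : List Int) : Option Int :=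
  medianaLoop arr (PySem.List.pyRange 0 arr.length 1)

-- ===== PORT B =====
def mediana_alt (arr : List Int) : Option Int :=
  if arr = [] then none
  else
    let s := PySem.List.sorted arr (fun x => x) false
    let c := PySem.List.pyGetD s (PySem.Int.floordiv (arr.length : Int) 2) 0
    let lg := arr.foldl
      (fun (lg : Int × Int) x =>
        if x < c then (lg.1 + 1, lg.2) else if x > c then (lg.1, lg.2 + 1) else lg)
      (0, 0)
    if lg.1 = lg.2 then some c else none

-- ===== PRECONDITION & SPEC =====
def Spec_mediana (arr : List Int) (out : Option Int) : Prop := out = mediana_alt arr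
instance (arr : List Int) (out : Option Int) : Decidable (Spec_mediana arr out) := by unfold Spec_mediana; infer_instance

-- ===== CLAIM (what is proved, stated in full; the proofs are below) =====
def Claim_equal_mediana : Prop := ∀ (arr : List Int), Dom_mediana arr → Spec_mediana arr (mediana arr)

-- ===== LEMMAS AND PROOFS =====

-- the predicate both programs decide: equally many strictly greater and strictly smaller
def balanced (arr : List Int) (v : Int) : Bool :=
  arr.countP (fun x => v < x) == arr.countP (fun x => x < v)

-- A's inner loop counts (greater, smaller)
theorem innerFold_eq (vi : Int) (xs : List Int) (a b : Int) :
    xs.foldl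
      (fun (s : Int × Int) x =>
        if x ≠ vi then (if x > vi then (s.1 + 1, s.2) else (s.1, s.2 + 1)) else s)
      (a, b)
    = (a + (xs.countP (fun x => vi < x) : Int), b + (xs.countP (fun x => x < vi) : Int)) := by
  induction xs generalizing a b with
  | nil => simp
  | cons x t ih =>
    rw [List.foldl_cons]
    rcases lt_trichotomy x vi with hlt | heq | hgt
    · rw [if_pos (ne_of_lt hlt), if_neg (not_lt.mpr hlt.le)]
      rw [ih]
      simp only [List.countP_cons, Prod.mk.injEq]
      simp [not_lt.mpr hlt.le, hlt]
      ring
    · rw [if_neg (by simp [heq])]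
      rw [ih]
      simp [heq]
    · rw [if_pos (ne_of_gt hgt), if_pos hgt]
      rw [ih]
      simp only [List.countP_cons, Prod.mk.injEq]
      simp [not_lt.mpr hgt.le, hgt]
      ring

theorem medianaInner_eq (arr : List Int) (vi : Int) :
    medianaInner arr vi
      = ((arr.countP (fun x => vi < x) : Int), (arr.countP (fun x => x < vi) : Int)) := by
  unfold medianaInner
  rw [PySem.List.foldl_pyRange_zero_pyGetD' arr 0
      (fun (s : Int × Int) x =>
        if x ≠ vi then (if x > vi then (s.1 + 1, s.2) else (s.1, s.2 + 1)) else s) (0, 0)]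
  rw [innerFold_eq]
  simp

-- A is a first-match search over the elements
theorem medianaLoop_eq (arr : List Int) :
    ∀ (n k : Nat), arr.length - k = n →
      medianaLoop arr (PySem.List.pyRange (k : Int) (arr.length : Int) 1)
        = (arr.drop k).find? (balanced arr) := by
  intro n
  induction n with
  | zero =>
    intro k hk
    have hge : arr.length ≤ k := by omega
    have h1 : PySem.List.pyRange (k : Int) (arr.length : Int) 1 = [] := by
      simp [PySem.List.pyRange]; omega
    have h2 : arr.drop k = [] := List.drop_eq_nil_of_le hge
    rw [h1, h2]; rfl
  | succ n ih =>
    intro k hk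
    have hlt : k < arr.length := by omega
    have hcons : PySem.List.pyRange (k : Int) (arr.length : Int) 1
        = (k : Int) :: PySem.List.pyRange ((k : Int) + 1) (arr.length : Int) 1 :=
      PySem.List.pyRange_one_cons (by exact_mod_cast hlt)
    rw [hcons]
    have hdrop : arr.drop k = arr[k] :: arr.drop (k + 1) :=
      List.drop_eq_getElem_cons hlt
    rw [hdrop]
    show (let vi := PySem.List.pyGetD arr (k : Int) 0;
          let nm := medianaInner arr vi;
          if nm.1 = nm.2 then some vi
          else medianaLoop arr (PySem.List.pyRange ((k : Int) + 1) (arr.length : Int) 1))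
        = _
    have hget : PySem.List.pyGetD arr (k : Int) 0 = arr[k] := by
      rw [PySem.List.pyGetD_natCast]; exact List.getD_eq_getElem arr 0 hlt
    simp only [hget, medianaInner_eq]
    have hpush : ((k : Int) + 1) = ((k + 1 : Nat) : Int) := by push_cast; ring
    rw [hpush, ih (k + 1) (by omega)]
    by_cases hbal : balanced arr arr[k] = true
    · have heq : (arr.countP (fun x => arr[k] < x) : Int) = (arr.countP (fun x => x < arr[k]) : Int) := by
        have h2 : arr.countP (fun x => arr[k] < x) = arr.countP (fun x => x < arr[k]) := by
          simpa [balanced] using hbal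
        exact_mod_cast h2
      rw [if_pos heq, List.find?_cons_of_pos hbal]
    · have hne : ¬ ((arr.countP (fun x => arr[k] < x) : Int) = (arr.countP (fun x => x < arr[k]) : Int)) := by
        intro h
        apply hbal
        have : arr.countP (fun x => arr[k] < x) = arr.countP (fun x => x < arr[k]) := by exact_mod_cast h
        simp [balanced, this]
      rw [if_neg hne, List.find?_cons_of_neg hbal]

theorem mediana_eq_find (arr : List Int) :
    mediana arr = arr.find? (balanced arr) := by
  unfold mediana
  have := medianaLoop_eq arr arr.length 0 (by omega)
  simpa using this

-- index characterisation of "< v" in a sorted list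
theorem sorted_lt_iff (v : Int) :
    ∀ (s : List Int), s.Pairwise (· ≤ ·) → ∀ (j : Nat) (hj : j < s.length),
      (s[j] < v ↔ j < s.countP (fun x => decide (x < v))) := by
  intro s
  induction s with
  | nil => intro _ j hj; simp at hj
  | cons x t ih =>
    intro hp j hj
    have hpt := (List.pairwise_cons.mp hp).2
    have hxt := (List.pairwise_cons.mp hp).1
    by_cases hx : x < v
    · have hc : (x :: t).countP (fun x => decide (x < v)) = t.countP (fun x => decide (x < v)) + 1 := by
        simp [hx]
      rw [hc]
      cases j with
      | zero => simp [hx]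
      | succ j =>
        have hj' : j < t.length := by simpa using hj
        have hiff := ih hpt j hj'
        simp only [List.getElem_cons_succ]
        constructor
        · intro h; have := hiff.mp h; omega
        · intro h; exact hiff.mpr (by omega)
    · have hc : (x :: t).countP (fun x => decide (x < v)) = 0 := by
        rw [List.countP_eq_zero]
        intro a ha
        rcases List.mem_cons.mp ha with rfl | hat
        · simpa using hx
        · have : x ≤ a := hxt a hat
          simp; omega
      rw [hc]
      cases j with
      | zero => simp [hx]
      | succ j =>
        have hj' : j < t.length := by simpa using hj
        have hxa : x ≤ t[j] := hxt _ (List.getElem_mem hj')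
        simp only [List.getElem_cons_succ]
        constructor
        · intro h; omega
        · intro h; omega

theorem sorted_gt_iff (v : Int) :
    ∀ (s : List Int), s.Pairwise (· ≤ ·) → ∀ (j : Nat) (hj : j < s.length),
      (v < s[j] ↔ s.countP (fun x => decide (x ≤ v)) ≤ j) := by
  intro s
  induction s with
  | nil => intro _ j hj; simp at hj
  | cons x t ih =>
    intro hp j hj
    have hpt := (List.pairwise_cons.mp hp).2
    have hxt := (List.pairwise_cons.mp hp).1
    by_cases hx : x ≤ v
    · have hc : (x :: t).countP (fun x => decide (x ≤ v)) = t.countP (fun x => decide (x ≤ v)) + 1 := by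
        simp [hx]
      rw [hc]
      cases j with
      | zero =>
        simp only [List.getElem_cons_zero]
        constructor
        · intro h; omega
        · intro h; omega
      | succ j =>
        have hj' : j < t.length := by simpa using hj
        have hiff := ih hpt j hj'
        simp only [List.getElem_cons_succ]
        constructor
        · intro h; have := hiff.mp h; omega
        · intro h; exact hiff.mpr (by omega)
    · have hc : (x :: t).countP (fun x => decide (x ≤ v)) = 0 := by
        rw [List.countP_eq_zero]
        intro a ha
        rcases List.mem_cons.mp ha with rfl | hat
        · simpa using hx
        · have : x ≤ a := hxt a hat
          simp; omega
      rw [hc]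
      cases j with
      | zero =>
        simp only [List.getElem_cons_zero]
        constructor <;> intro _ <;> omega
      | succ j =>
        have hj' : j < t.length := by simpa using hj
        have hxa : x ≤ t[j] := hxt _ (List.getElem_mem hj')
        simp only [List.getElem_cons_succ]
        constructor <;> intro _ <;> omega

theorem countP_le_split (v : Int) (s : List Int) :
    s.countP (fun x => decide (x ≤ v))
      = s.countP (fun x => decide (x < v)) + s.count v := by
  induction s with
  | nil => simp
  | cons x t ih =>
    simp only [List.countP_cons, List.count_cons, ih]
    rcases lt_trichotomy x v with h | h | h
    · simp [h, le_of_lt h, ne_of_lt h]; omega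
    · subst h; simp; omega
    · simp [not_le.mpr h, not_lt.mpr (le_of_lt h), ne_of_gt h]

theorem count_trisplit (v : Int) (s : List Int) :
    s.countP (fun x => decide (x < v)) + s.count v + s.countP (fun x => decide (v < x))
      = s.length := by
  induction s with
  | nil => simp
  | cons x t ih =>
    simp only [List.countP_cons, List.count_cons, List.length_cons]
    rcases lt_trichotomy x v with h | h | h
    · simp [h, not_lt.mpr (le_of_lt h), ne_of_lt h]; omega
    · subst h; simp; omega
    · simp [h, not_lt.mpr (le_of_lt h), (ne_of_gt h)]; omega

-- any balanced element equals the middle of the sorted list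
theorem balanced_eq_mid (arr s : List Int) (hperm : s.Perm arr)
    (hpair : s.Pairwise (· ≤ ·)) (v : Int) (hv : v ∈ arr)
    (hbal : arr.countP (fun x => v < x) = arr.countP (fun x => x < v))
    (h : arr.length / 2 < s.length) :
    s[arr.length / 2] = v := by
  have htri := count_trisplit v arr
  have he1 : 1 ≤ arr.count v := List.one_le_count_iff.mpr hv
  have hcl : s.countP (fun x => decide (x < v)) = arr.countP (fun x => decide (x < v)) :=
    hperm.countP_eq _
  have hcle : s.countP (fun x => decide (x ≤ v))
      = arr.countP (fun x => decide (x < v)) + arr.count v := by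
    rw [countP_le_split, hcl, hperm.count_eq]
  have hslen : s.length = arr.length := hperm.length_eq
  have hnotlt : ¬ s[arr.length / 2] < v := by
    rw [sorted_lt_iff v s hpair _ h, hcl]
    omega
  have hnotgt : ¬ v < s[arr.length / 2] := by
    rw [sorted_gt_iff v s hpair _ h, hcle]
    omega
  omega

-- B's verification pass counts (smaller, greater)
theorem altFold_eq (c : Int) (xs : List Int) (a b : Int) :
    xs.foldl
      (fun (lg : Int × Int) x =>
        if x < c then (lg.1 + 1, lg.2) else if x > c then (lg.1, lg.2 + 1) else lg)
      (a, b)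
    = (a + (xs.countP (fun x => x < c) : Int), b + (xs.countP (fun x => c < x) : Int)) := by
  induction xs generalizing a b with
  | nil => simp
  | cons x t ih =>
    rw [List.foldl_cons]
    rcases lt_trichotomy x c with hlt | heq | hgt
    · rw [if_pos hlt]
      rw [ih]
      simp only [List.countP_cons, Prod.mk.injEq]
      simp [not_lt.mpr hlt.le, hlt]
      ring
    · rw [if_neg (by simp [heq]), if_neg (by simp [heq])]
      rw [ih]
      simp [heq]
    · rw [if_neg (not_lt.mpr hgt.le), if_pos hgt]
      rw [ih]
      simp only [List.countP_cons, Prod.mk.injEq]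
      simp [not_lt.mpr hgt.le, hgt]
      ring

-- ===== VERDICT (by name: the statement is the Claim_ definition above) =====
theorem mediana_spec : Claim_equal_mediana := by
  unfold Claim_equal_mediana
  intro arr _
  unfold Spec_mediana
  rw [mediana_eq_find]
  unfold mediana_alt
  by_cases hnil : arr = []
  · simp [hnil]
  · simp only [hnil, ite_false]
    have hperm : (PySem.List.sorted arr (fun x => x) false).Perm arr :=
      PySem.List.sorted_perm arr (fun x => x) false
    have hpair : (PySem.List.sorted arr (fun x => x) false).Pairwise (· ≤ ·) := by
      simpa using PySem.List.sorted_pairwise arr (fun x => x)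
    have hpos : 0 < arr.length := List.length_pos_iff.mpr hnil
    have hmidlt : arr.length / 2 < (PySem.List.sorted arr (fun x => x) false).length := by
      have := hperm.length_eq; omega
    have hfd : PySem.Int.floordiv (arr.length : Int) 2 = ((arr.length / 2 : Nat) : Int) :=
      PySem.Int.floordiv_natCast arr.length 2
    have hget : PySem.List.pyGetD (PySem.List.sorted arr (fun x => x) false)
        (PySem.Int.floordiv (arr.length : Int) 2) 0
        = (PySem.List.sorted arr (fun x => x) false)[arr.length / 2] := by
      rw [hfd, PySem.List.pyGetD_natCast]
      exact List.getD_eq_getElem _ 0 hmidlt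
    rw [hget, altFold_eq]
    set c := (PySem.List.sorted arr (fun x => x) false)[arr.length / 2] with hc
    have hcmem : c ∈ arr := hperm.mem_iff.mp (List.getElem_mem hmidlt)
    simp only [zero_add]
    by_cases hbc : arr.countP (fun x => c < x) = arr.countP (fun x => x < c)
    · -- c is balanced: find? must return an element, and any balanced element equals c
      have hbcb : balanced arr c = true := by simp [balanced, hbc]
      have hfind : arr.find? (balanced arr) ≠ none := by
        intro hn
        rw [List.find?_eq_none] at hn
        exact hn c hcmem hbcb
      rcases Option.ne_none_iff_exists'.mp hfind with ⟨w, hw⟩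
      have hwmem : w ∈ arr := List.mem_of_find?_eq_some hw
      have hwbal : balanced arr w = true := List.find?_some hw
      have hwbal' : arr.countP (fun x => w < x) = arr.countP (fun x => x < w) := by
        simpa [balanced] using hwbal
      have hwc : c = w :=
        balanced_eq_mid arr _ hperm hpair w hwmem hwbal' hmidlt
      have hic : (arr.countP (fun x => x < c) : Int) = (arr.countP (fun x => c < x) : Int) := by
        exact_mod_cast hbc.symm
      rw [hw, if_pos hic, hwc]
    · -- no element is balanced (only c could be): find? returns none
      have hnone : arr.find? (balanced arr) = none := by
        rw [List.find?_eq_none]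
        intro x hx hxb
        have hxb' : arr.countP (fun y => x < y) = arr.countP (fun y => y < x) := by
          simpa [balanced] using hxb
        have hxc : c = x :=
          balanced_eq_mid arr _ hperm hpair x hx hxb' hmidlt
        exact hbc (hxc ▸ hxb')
      have hic : ¬ ((arr.countP (fun x => x < c) : Int) = (arr.countP (fun x => c < x) : Int)) := by
        intro h; exact hbc (by exact_mod_cast h.symm)
      rw [hnone, if_neg hic]
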